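-- pv_equiv track=rewrite | github.com/lukew3/competitive-programming | icpc/2022/naq/A/oldmain.py | findLower
-- ===== SOURCE A (Python) =====
-- def findLower(n):
--     a = int(n[0])-1
--     digFound = False
--     while not digFound:
--         if a == -1:
--             a = ""
--             break
--         if str(a) in n:
--             a-=1
--         else:
--             digFound = True
--     greatest = 9
--     while str(greatest) in n:
--         greatest-=1
--         if greatest == -1:
--             return False
--     return f"{a}{str(greatest)*(len(n)-1)}"
-- ===== SOURCE B (Python) =====
-- def findLower(n):
--     mask = 0
--     for c in n:
--         if '0' <= c <= '9':
--             mask |= 1 << (ord(c) - 48)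
--     absent = ~mask & 0x3FF
--     if absent == 0:
--         return False
--     greatest = absent.bit_length() - 1
--     lowmask = absent & ((1 << int(n[0])) - 1)
--     a = "" if lowmask == 0 else str(lowmask.bit_length() - 1)
--     return f"{a}{str(greatest) * (len(n) - 1)}"
-- ===== Notes on version B (the rewrite author's own statement) =====
-- stated objective: alternative
-- what changed: Replaces A's two decrementing substring-membership scans over the digit space with a bitmask algorithm: one pass ORs each digit of n into a 10-bit presence mask, and both answers are read off in closed form as bit_length of the complement mask (and of the complement masked below the first digit).
-- outside the precondition, e.g. on findLower('12345678901234'): A returns False, B returns False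
import Mathlib
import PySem

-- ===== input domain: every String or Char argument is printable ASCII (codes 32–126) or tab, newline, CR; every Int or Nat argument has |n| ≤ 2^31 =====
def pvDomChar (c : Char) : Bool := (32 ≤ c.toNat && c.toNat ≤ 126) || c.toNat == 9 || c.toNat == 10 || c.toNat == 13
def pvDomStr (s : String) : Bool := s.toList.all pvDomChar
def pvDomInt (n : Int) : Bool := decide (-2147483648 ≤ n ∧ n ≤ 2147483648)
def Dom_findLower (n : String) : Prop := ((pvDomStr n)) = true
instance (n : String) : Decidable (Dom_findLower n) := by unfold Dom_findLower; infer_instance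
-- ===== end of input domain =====

-- B replaces A's two decrementing substring-membership scans with a bitmask algorithm: one pass
-- ORs the digits of n into a 10-bit presence mask and reads both answers off in closed form via
-- bit_length of the complement mask; objective: alternative.

-- ===== PORT A =====
-- first while loop: decrement a while str(a) occurs in n; none models Python's a = ""
def pvLoop1 (cs : List Char) (a : Int) : Option Int :=
  if a < 0 then none
  else if PySem.Chars.isIn (PySem.Int.toChars a) cs then pvLoop1 cs (a - 1)
  else some a
termination_by (a + 1).toNat
decreasing_by omega

-- second while loop: decrement greatest while str(greatest) occurs in n; none models 'return False'
def pvLoop2 (cs : List Char) (g : Int) : Option Int :=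
  if PySem.Chars.isIn (PySem.Int.toChars g) cs then
    if g - 1 < 0 then none else pvLoop2 cs (g - 1)
  else some g
termination_by (g + 1).toNat
decreasing_by omega

def findLower (n : String) : Option String :=
  match (PySem.Str.pyGet? n 0).bind (fun c => PySem.Int.ofChars? [c]) with
  | none => none  -- IndexError / ValueError: excluded by Pre_
  | some d =>
    match pvLoop2 n.toList 9 with
    | none => none  -- Python's 'return False'
    | some g =>
      let aStr : List Char := match pvLoop1 n.toList (d - 1) with
        | none => []
        | some a => PySem.Int.toChars a
      some (String.ofList (aStr ++ PySem.List.pyRepeat (PySem.Int.toChars g) ((n.toList.length : Int) - 1)))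

-- ===== PORT B =====
-- mask |= 1 << (ord(c)-48) for each digit char of n  (Python for-loop as a foldl)
def presentMask (cs : List Char) : Int :=
  cs.foldl (fun m c => if '0' ≤ c ∧ c ≤ '9' then PySem.Int.bor m ((1 : Int) <<< (c.toNat - 48)) else m) 0

def findLower_alt (n : String) : Option String :=
  let mask := presentMask n.toList
  let absent := PySem.Int.band (Int.not mask) 1023   -- ~mask & 0x3FF (PySem band/not are Python-exact)
  if absent = 0 then none  -- Python's 'return False' (a bool, not a str): excluded by Pre_
  else
    match (PySem.Str.pyGet? n 0).bind (fun c => PySem.Int.ofChars? [c]) with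
    | none => none  -- IndexError / ValueError in int(n[0]): excluded by Pre_
    | some first =>
      let greatest : Int := (PySem.Int.bitLength absent : Int) - 1
      -- absent & ((1 << int(n[0])) - 1); first ≥ 0 whenever ofChars? succeeds, so .toNat is exact
      let lowmask := PySem.Int.band absent (((1 : Int) <<< first.toNat) - 1)
      let a : List Char := if lowmask = 0 then []
        else PySem.Int.toChars ((PySem.Int.bitLength lowmask : Int) - 1)
      some (String.ofList (a ++ PySem.List.pyRepeat (PySem.Int.toChars greatest) ((n.toList.length : Int) - 1)))

-- ===== PRECONDITION & SPEC =====
-- Pre_ excludes the inputs where A raises — the empty string (IndexError on n[0]) and a non-digit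
-- first character (ValueError in int(n[0])) — and the strings containing all ten digits, on which
-- A returns the bool False rather than a value of the declared Optional[str] type.
def Pre_findLower (n : String) : Prop := n ≠ "" ∧ (n.toList.headD 'x').isDigit = true ∧
  ¬ ("0123456789".toList.all (fun c => n.toList.contains c) = true)
instance (n : String) : Decidable (Pre_findLower n) := by unfold Pre_findLower; infer_instance

def pvWitness_findLower : String := "361"

def Spec_findLower (n : String) (out : Option String) : Prop := out = findLower_alt n
instance (n : String) (out : Option String) : Decidable (Spec_findLower n out) := by unfold Spec_findLower; infer_instance

-- ===== CLAIM (what is proved, stated in full; the proofs are below) =====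
def Claim_equal_findLower : Prop := ∀ (n : String), Dom_findLower n → Pre_findLower n → Spec_findLower n (findLower n)

-- ===== LEMMAS AND PROOFS =====

-- the largest absent digit below k: characterisation of A's scans
def absentUpto (cs : List Char) (k : Nat) : Option Nat :=
  ((List.range k).filter (fun j => !decide (Char.ofNat (48 + j) ∈ cs))).getLast?

-- the same, read off a Nat presence bitmask
def maskAbsentUpto (m : Nat) (k : Nat) : Option Nat :=
  ((List.range k).filter (fun j => !(m.testBit j))).getLast?

-- Nat-valued mirror of presentMask's fold
def pmFold (cs : List Char) (m : Nat) : Nat :=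
  cs.foldl (fun m c => if '0' ≤ c ∧ c ≤ '9' then m ||| (1 <<< (c.toNat - 48)) else m) m

theorem isIn_singleton (c : Char) (cs : List Char) :
    PySem.Chars.isIn [c] cs = decide (c ∈ cs) := by
  by_cases h : c ∈ cs
  · simp [h]
    exact (PySem.Chars.isIn_iff_infix _ _).2 ((List.singleton_infix_iff c cs).2 h)
  · simp [h]
    exact (PySem.Chars.isIn_eq_false_iff _ _).2 (fun hi => h ((List.singleton_infix_iff c cs).1 hi))

theorem toChars_digit (j : Nat) (h : j < 10) :
    PySem.Int.toChars (j : Int) = [Char.ofNat (48 + j)] := by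
  interval_cases j <;> decide

theorem ofChars?_digit (j : Nat) (h : j < 10) :
    PySem.Int.ofChars? [Char.ofNat (48 + j)] = some (j : Int) := by
  interval_cases j <;> decide

theorem loop1_eq (cs : List Char) (k : Nat) (hk : k ≤ 10) :
    pvLoop1 cs ((k : Int) - 1) = (absentUpto cs k).map Int.ofNat := by
  induction k with
  | zero => rw [pvLoop1]; simp [absentUpto]
  | succ k ih =>
    have h1 : ((k + 1 : Nat) : Int) - 1 = (k : Int) := by push_cast; ring
    rw [h1, pvLoop1]
    rw [if_neg (by omega)]
    rw [toChars_digit k (by omega), isIn_singleton]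
    by_cases hm : Char.ofNat (48 + k) ∈ cs
    · rw [if_pos (by simpa using hm), ih (by omega)]
      simp [absentUpto, List.range_succ, hm]
    · rw [if_neg (by simpa using hm)]
      simp [absentUpto, List.range_succ, hm]

theorem loop2_eq (cs : List Char) (k : Nat) (hk1 : 1 ≤ k) (hk : k ≤ 10) :
    pvLoop2 cs ((k : Int) - 1) = (absentUpto cs k).map Int.ofNat := by
  induction k with
  | zero => omega
  | succ k ih =>
    have h1 : ((k + 1 : Nat) : Int) - 1 = (k : Int) := by push_cast; ring
    rw [h1, pvLoop2]
    rw [toChars_digit k (by omega), isIn_singleton]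
    by_cases hm : Char.ofNat (48 + k) ∈ cs
    · rw [if_pos (by simpa using hm)]
      rcases Nat.eq_zero_or_pos k with hk0 | hk0
      · subst hk0
        rw [if_pos (by norm_num)]
        simp [absentUpto, hm]
      · rw [if_neg (by omega), ih (by omega) (by omega)]
        simp [absentUpto, List.range_succ, hm]
    · rw [if_neg (by simpa using hm)]
      simp [absentUpto, List.range_succ, hm]

theorem digit_bounds (c : Char) (h1 : '0' ≤ c) (h2 : c ≤ '9') : 48 ≤ c.toNat ∧ c.toNat ≤ 57 := by
  rw [Char.le_def] at h1 h2
  rw [UInt32.le_iff_toNat_le] at h1 h2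
  exact ⟨h1, h2⟩

theorem char_eq_of_toNat (a b : Char) (h : a.toNat = b.toNat) : a = b := by
  apply Char.ext
  exact UInt32.toNat_inj.1 h

-- presentMask computes the cast of the Nat fold
theorem presentMask_eq_pmFold (cs : List Char) :
    ∀ m : Nat, cs.foldl (fun m c => if '0' ≤ c ∧ c ≤ '9' then PySem.Int.bor m ((1 : Int) <<< (c.toNat - 48)) else m) (m : Int)
      = ((pmFold cs m : Nat) : Int) := by
  induction cs with
  | nil => intro m; simp [pmFold]
  | cons c cs ih =>
    intro m
    simp only [List.foldl_cons, pmFold, List.foldl_cons] at *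
    by_cases hc : '0' ≤ c ∧ c ≤ '9'
    · rw [if_pos hc, if_pos hc]
      have hcast : ((1 : Int) <<< (c.toNat - 48)) = (((1 <<< (c.toNat - 48) : Nat) : Nat) : Int) := by
        have h9 : c.toNat - 48 < 10 := by
          obtain ⟨h1, h2⟩ := digit_bounds c hc.1 hc.2; omega
        interval_cases h : (c.toNat - 48) <;> decide
      rw [hcast, PySem.Int.bor_natCast]
      exact ih _
    · rw [if_neg hc, if_neg hc]; exact ih m

theorem pmFold_lt (cs : List Char) : ∀ m : Nat, m < 1024 → pmFold cs m < 1024 := by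
  induction cs with
  | nil => intro m hm; simpa [pmFold] using hm
  | cons c cs ih =>
    intro m hm
    simp only [pmFold, List.foldl_cons] at *
    by_cases hc : '0' ≤ c ∧ c ≤ '9'
    · rw [if_pos hc]
      apply ih
      have h9 : c.toNat - 48 < 10 := by
        obtain ⟨h1, h2⟩ := digit_bounds c hc.1 hc.2; omega
      have h2 : (1 <<< (c.toNat - 48) : Nat) < 1024 := by
        rw [Nat.shiftLeft_eq, one_mul]
        calc 2 ^ (c.toNat - 48) ≤ 2 ^ 9 := Nat.pow_le_pow_right (by norm_num) (by omega)
          _ < 1024 := by norm_num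
      have : (1024 : Nat) = 2 ^ 10 := by norm_num
      rw [this] at hm h2 ⊢
      exact Nat.or_lt_two_pow hm h2
    · rw [if_neg hc]; exact ih m hm

theorem pmFold_testBit (cs : List Char) : ∀ m : Nat, ∀ j : Nat, j < 10 →
    (pmFold cs m).testBit j = (m.testBit j || decide (Char.ofNat (48 + j) ∈ cs)) := by
  induction cs with
  | nil => intro m j _; simp [pmFold]
  | cons c cs ih =>
    intro m j hj
    simp only [pmFold, List.foldl_cons] at *
    have hofj : (Char.ofNat (48 + j)).toNat = 48 + j := by
      interval_cases j <;> decide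
    by_cases hc : '0' ≤ c ∧ c ≤ '9'
    · rw [if_pos hc, ih _ j hj]
      have hrange : 48 ≤ c.toNat ∧ c.toNat ≤ 57 := digit_bounds c hc.1 hc.2
      have hbit : (m ||| 1 <<< (c.toNat - 48)).testBit j = (m.testBit j || decide (j = c.toNat - 48)) := by
        rw [Nat.testBit_or, Nat.shiftLeft_eq, one_mul, Nat.testBit_two_pow]
        by_cases h : j = c.toNat - 48 <;> simp [h, eq_comm]
      rw [hbit]
      have hmem : (Char.ofNat (48 + j) = c) ↔ (j = c.toNat - 48) := by
        constructor
        · intro he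
          have : c.toNat = 48 + j := by rw [← he]; exact hofj
          omega
        · intro h
          apply char_eq_of_toNat
          omega
      simp only [List.mem_cons, hmem]
      by_cases h1 : j = c.toNat - 48 <;> by_cases h2 : Char.ofNat (48 + j) ∈ cs <;>
        simp [h1, h2]
    · rw [if_neg hc, ih _ j hj]
      have hne : Char.ofNat (48 + j) ≠ c := by
        intro he
        apply hc
        have hct : c.toNat = 48 + j := by rw [← he]; exact hofj
        have h0 : '0'.toNat = 48 := by decide
        have h9 : '9'.toNat = 57 := by decide
        constructor <;>
          (rw [Char.le_def, UInt32.le_iff_toNat_le]; show _ ≤ _) <;>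
          simp only [Char.toNat] at hct h0 h9 <;> omega
      simp [hne]

theorem absentUpto_eq_mask (cs : List Char) (k : Nat) (hk : k ≤ 10) :
    absentUpto cs k = maskAbsentUpto (pmFold cs 0) k := by
  unfold absentUpto maskAbsentUpto
  congr 1
  apply List.filter_congr
  intro j hj
  have hj10 : j < 10 := by have := List.mem_range.1 hj; omega
  rw [pmFold_testBit cs 0 j hj10]
  simp

-- finite bridge: for every 10-bit mask, the bit-arithmetic answers equal the scan answers
set_option maxRecDepth 8192 in
set_option maxHeartbeats 1000000 in
theorem bridge10 : ∀ m : Nat, m < 1024 →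
    ((maskAbsentUpto m 10).map (fun g => (g : Int)) =
      (if PySem.Int.band (Int.not (m : Int)) 1023 = 0 then none
       else some ((PySem.Int.bitLength (PySem.Int.band (Int.not (m : Int)) 1023) : Int) - 1))) := by
  decide

set_option maxRecDepth 8192 in
set_option maxHeartbeats 1000000 in
theorem bridgeLow : ∀ m : Nat, m < 1024 → ∀ d : Nat, d < 10 →
    ((maskAbsentUpto m d).map (fun a => (a : Int)) =
      (if PySem.Int.band (PySem.Int.band (Int.not (m : Int)) 1023) (((1 : Int) <<< d) - 1) = 0 then none
       else some ((PySem.Int.bitLength (PySem.Int.band (PySem.Int.band (Int.not (m : Int)) 1023) (((1 : Int) <<< d) - 1)) : Int) - 1))) := by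
  decide

-- ===== VERDICT (by name: the statement is the Claim_ definition above) =====
theorem findLower_spec : Claim_equal_findLower := by
  intro n _ hpre
  unfold Spec_findLower
  obtain ⟨hne, hdig, hnall⟩ := hpre
  rcases hcs : n.toList with _ | ⟨c0, rest⟩
  · exact absurd (by cases n; simp_all) hne
  rw [hcs] at hdig
  simp only [List.headD_cons] at hdig
  have hdig' : 48 ≤ c0.toNat ∧ c0.toNat ≤ 57 := by
    simp [Char.isDigit] at hdig; exact ⟨hdig.1, hdig.2⟩
  obtain ⟨d, hd10, hc0⟩ : ∃ d, d < 10 ∧ c0 = Char.ofNat (48 + d) := by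
    refine ⟨c0.toNat - 48, by omega, ?_⟩
    have h48 : 48 + (c0.toNat - 48) = c0.toNat := by omega
    rw [h48]; exact (Char.ofNat_toNat c0).symm
  have hget : PySem.Str.pyGet? n 0 = some c0 := by simp [hcs]
  have hint : PySem.Int.ofChars? [c0] = some (d : Int) := by
    rw [hc0]; exact ofChars?_digit d hd10
  -- the mask value
  have hm : presentMask n.toList = ((pmFold n.toList 0 : Nat) : Int) := by
    have := presentMask_eq_pmFold n.toList 0
    simpa [presentMask] using this
  have hmlt : pmFold n.toList 0 < 1024 := pmFold_lt n.toList 0 (by norm_num)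
  -- loop characterisations
  have h9 : pvLoop2 n.toList 9 = (maskAbsentUpto (pmFold n.toList 0) 10).map Int.ofNat := by
    have := loop2_eq n.toList 10 (by omega) (by omega)
    norm_num at this
    rw [this, absentUpto_eq_mask n.toList 10 (by omega)]
  have h1 : pvLoop1 n.toList ((d : Int) - 1) = (maskAbsentUpto (pmFold n.toList 0) d).map Int.ofNat := by
    rw [loop1_eq n.toList d (by omega), absentUpto_eq_mask n.toList d (by omega)]
  -- the overall absent set is nonempty (some digit missing)
  have hsome : ∃ g, maskAbsentUpto (pmFold n.toList 0) 10 = some g := by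
    rw [← absentUpto_eq_mask n.toList 10 (by omega)]
    simp only [List.all_eq_true, not_forall] at hnall
    obtain ⟨c, hcmem, hcnot⟩ := hnall
    have hlist : ("0123456789".toList) = ['0','1','2','3','4','5','6','7','8','9'] := by decide
    rw [hlist] at hcmem
    have : ∃ j, j < 10 ∧ c = Char.ofNat (48 + j) := by
      fin_cases hcmem <;> first | exact ⟨0, by norm_num, by decide⟩ | exact ⟨1, by norm_num, by decide⟩ | exact ⟨2, by norm_num, by decide⟩ | exact ⟨3, by norm_num, by decide⟩ | exact ⟨4, by norm_num, by decide⟩ | exact ⟨5, by norm_num, by decide⟩ | exact ⟨6, by norm_num, by decide⟩ | exact ⟨7, by norm_num, by decide⟩ | exact ⟨8, by norm_num, by decide⟩ | exact ⟨9, by norm_num, by decide⟩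
    obtain ⟨j, hj10, rfl⟩ := this
    have hjmem : j ∈ (List.range 10).filter (fun j => !decide (Char.ofNat (48 + j) ∈ n.toList)) := by
      rw [List.mem_filter]
      refine ⟨List.mem_range.2 hj10, ?_⟩
      simp only [Bool.not_eq_eq_eq_not, Bool.not_true, decide_eq_false_iff_not]
      intro hmem
      exact hcnot (by simp [hmem])
    have hnil : (List.range 10).filter (fun j => !decide (Char.ofNat (48 + j) ∈ n.toList)) ≠ [] :=
      List.ne_nil_of_mem hjmem
    unfold absentUpto
    rcases hlast : ((List.range 10).filter (fun j => !decide (Char.ofNat (48 + j) ∈ n.toList))).getLast? with _ | g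
    · exact absurd (List.getLast?_eq_none_iff.1 hlast) hnil
    · exact ⟨g, rfl⟩
  obtain ⟨g, hg⟩ := hsome
  set m := pmFold n.toList 0 with hmdef
  have hb10 := bridge10 m hmlt
  have hblow := bridgeLow m hmlt d hd10
  rw [hg] at hb10
  have habsne : PySem.Int.band (Int.not (m : Int)) 1023 ≠ 0 := by
    intro h0; rw [if_pos h0] at hb10; simp at hb10
  rw [if_neg habsne] at hb10
  replace hb10 : ((g : Int)) = (PySem.Int.bitLength (PySem.Int.band (Int.not (m : Int)) 1023) : Int) - 1 := by
    simpa using hb10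
  -- evaluate both sides
  unfold findLower findLower_alt
  simp only [hget, Option.bind_some, hint, h9, hg, hm, Option.map_some]
  rw [if_neg habsne]
  have hdtoNat : ((d : Int)).toNat = d := by omega
  rw [hdtoNat]
  congr 1
  congr 1
  rcases hlow : maskAbsentUpto m d with _ | a
  · rw [hlow] at hblow
    replace hblow : (none : Option Int) = (if PySem.Int.band (PySem.Int.band (Int.not (m : Int)) 1023) (((1 : Int) <<< d) - 1) = 0 then none
        else some ((PySem.Int.bitLength (PySem.Int.band (PySem.Int.band (Int.not (m : Int)) 1023) (((1 : Int) <<< d) - 1)) : Int) - 1)) := by simpa using hblow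
    have h0 : PySem.Int.band (PySem.Int.band (Int.not (m : Int)) 1023) (((1 : Int) <<< d) - 1) = 0 := by
      by_contra hne0
      rw [if_neg hne0] at hblow; simp at hblow
    rw [h1, hlow, if_pos h0, ← hb10]
    simp
  · rw [hlow] at hblow
    replace hblow : some ((a : Int)) = (if PySem.Int.band (PySem.Int.band (Int.not (m : Int)) 1023) (((1 : Int) <<< d) - 1) = 0 then none
        else some ((PySem.Int.bitLength (PySem.Int.band (PySem.Int.band (Int.not (m : Int)) 1023) (((1 : Int) <<< d) - 1)) : Int) - 1)) := by simpa using hblow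
    have hne0 : PySem.Int.band (PySem.Int.band (Int.not (m : Int)) 1023) (((1 : Int) <<< d) - 1) ≠ 0 := by
      intro h0; rw [if_pos h0] at hblow; simp at hblow
    rw [if_neg hne0, Option.some_inj] at hblow
    rw [h1, hlow, if_neg hne0, ← hblow, ← hb10]
    simp
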